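-- pv_equiv track=rewrite | github.com/pypi-data/pypi-mirror-351 | packages/xyz-tools-plus/xyz_tools_plus-0.2.1b1-py3-none-any.whl/xyz_tools_plus/sort/sort.py | value_range_mapping_sort
-- ===== SOURCE A (Python) =====
-- def value_range_mapping_sort(nums, reverse=False):
--     if not nums:
--         return []
--
--     min_val, max_val = min(nums), max(nums)
--     range_size = max_val - min_val + 1\
--
--     # 如果值域过大，回退到 Timsort
--     if max_val - min_val > len(nums) * 10:
--         return sorted(nums)  # 回退到 Timsort
--
--     # 计数
--     count = [0] * range_size
--     for num in nums:
--         count[num - min_val] += 1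
--
--     # 起始位置表
--     start_positions = [0] * range_size
--     for i in range(1, range_size):
--         start_positions[i] = start_positions[i - 1] + count[i - 1]
--
--     # 构造结果，保持稳定性
--     result = [0] * len(nums)
--     for num in reversed(nums):  # 逆序遍历以保持稳定性
--         idx = num - min_val
--         pos = start_positions[idx]  # 注意：这里不需要减一，start_positions 是“第一个可用位置”
--         result[pos] = num
--         start_positions[idx] += 1  # 更新下一个相同数字的位置
--
--     if reverse:
--         result.reverse()
--
--     return result
-- ===== SOURCE B (Python) =====
-- def value_range_mapping_sort(nums, reverse=False):
--     if not nums: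
--         return []
--
--     min_val, max_val = min(nums), max(nums)
--
--     # same large-range guard as the original: fall back to Timsort
--     if max_val - min_val > len(nums) * 10:
--         return sorted(nums)
--
--     # counting pass
--     count = [0] * (max_val - min_val + 1)
--     for num in nums:
--         count[num - min_val] += 1
--
--     # emit buckets in value order (descending when reverse): no prefix-sum
--     # table and no placement pass are needed for plain integer keys
--     result = []
--     if reverse:
--         for i in range(len(count) - 1, -1, -1):
--             result.extend([min_val + i] * count[i])
--     else:
--         for i in range(len(count)):
--             result.extend([min_val + i] * count[i])
--     return result
-- ===== Notes on version B (the rewrite author's own statement) =====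
-- stated objective: simpler
-- what changed: Replaces the prefix-sum table and the reversed stable-placement pass with direct bucket emission: after counting, the result is built by extending with [min_val+i]*count[i] in ascending (or descending, for reverse=True) value order.
import Mathlib
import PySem

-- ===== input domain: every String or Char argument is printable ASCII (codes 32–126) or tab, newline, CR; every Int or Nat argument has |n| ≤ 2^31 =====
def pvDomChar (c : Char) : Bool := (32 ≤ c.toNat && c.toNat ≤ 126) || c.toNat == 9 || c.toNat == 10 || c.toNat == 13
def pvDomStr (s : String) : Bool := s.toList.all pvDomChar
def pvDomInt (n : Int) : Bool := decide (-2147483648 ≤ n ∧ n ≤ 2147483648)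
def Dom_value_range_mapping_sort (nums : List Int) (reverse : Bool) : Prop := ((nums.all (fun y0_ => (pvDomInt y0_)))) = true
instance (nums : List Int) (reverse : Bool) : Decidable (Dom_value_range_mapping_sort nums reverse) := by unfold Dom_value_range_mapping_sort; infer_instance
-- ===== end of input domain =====

-- B replaces A's prefix-sum table and reversed stable-placement pass by direct
-- bucket emission in value order (objective: simpler); same counting pass and
-- same large-range fallback to sorted(nums).

-- ===== PORT A =====
-- the counting loop 'for num in nums: count[num - min_val] += 1' (identical line in A and B)
def vrCount (nums : List Int) (min_val : Int) (range_size : Nat) : List Nat :=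
  nums.foldl
    (fun c num => c.set (num - min_val).toNat (c.getD (num - min_val).toNat 0 + 1))
    (List.replicate range_size 0)

def value_range_mapping_sort (nums : List Int) (reverse : Bool) : List Int :=
  if nums = [] then []
  else
    let min_val := (PySem.List.min? nums (fun x => x)).getD 0
    let max_val := (PySem.List.max? nums (fun x => x)).getD 0
    let range_size := (max_val - min_val + 1).toNat
    if max_val - min_val > (nums.length : Int) * 10 then
      PySem.List.sorted nums (fun x => x) false
    else
      let count := vrCount nums min_val range_size
      -- for i in range(1, range_size): start_positions[i] = start_positions[i-1] + count[i-1]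
      let start_positions := (List.range' 1 (range_size - 1)).foldl
        (fun s i => s.set i (s.getD (i - 1) 0 + count.getD (i - 1) 0))
        (List.replicate range_size 0)
      -- for num in reversed(nums): result[start_positions[idx]] = num; start_positions[idx] += 1
      let fin := nums.reverse.foldl
        (fun (st : List Nat × List Int) num =>
          let idx := (num - min_val).toNat
          let pos := st.1.getD idx 0
          (st.1.set idx (pos + 1), st.2.set pos num))
        (start_positions, List.replicate nums.length (0 : Int))
      if reverse then fin.2.reverse else fin.2

-- ===== PORT B =====
def value_range_mapping_sort_alt (nums : List Int) (reverse : Bool) : List Int :=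
  if nums = [] then []
  else
    let min_val := (PySem.List.min? nums (fun x => x)).getD 0
    let max_val := (PySem.List.max? nums (fun x => x)).getD 0
    if max_val - min_val > (nums.length : Int) * 10 then
      PySem.List.sorted nums (fun x => x) false
    else
      let count := vrCount nums min_val (max_val - min_val + 1).toNat
      -- result.extend([min_val + i] * count[i]) over bucket indices
      if reverse then
        ((List.range count.length).reverse).foldl
          (fun r i => r ++ List.replicate (count.getD i 0) (min_val + (i : Int))) []
      else
        (List.range count.length).foldl
          (fun r i => r ++ List.replicate (count.getD i 0) (min_val + (i : Int))) []

-- ===== PRECONDITION & SPEC =====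
def Spec_value_range_mapping_sort (nums : List Int) (reverse : Bool) (out : List Int) : Prop := out = value_range_mapping_sort_alt nums reverse
instance (nums : List Int) (reverse : Bool) (out : List Int) : Decidable (Spec_value_range_mapping_sort nums reverse out) := by unfold Spec_value_range_mapping_sort; infer_instance

-- ===== CLAIM (what is proved, stated in full; the proofs are below) =====
def Claim_equal_value_range_mapping_sort : Prop := ∀ (nums : List Int) (reverse : Bool), Dom_value_range_mapping_sort nums reverse → Spec_value_range_mapping_sort nums reverse (value_range_mapping_sort nums reverse)

-- ===== LEMMAS AND PROOFS =====

-- occurrence count of the i-th bucket value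
def cntOf (nums : List Int) (m : Int) (i : Nat) : Nat := nums.count (m + (i : Int))

-- prefix sums of the bucket counts
def prefOf (nums : List Int) (m : Int) : Nat → Nat
  | 0 => 0
  | i + 1 => prefOf nums m i + cntOf nums m i

-- the common sorted value: buckets in ascending value order
def targetOf (nums : List Int) (m : Int) (R : Nat) : List Int :=
  (List.range R).flatMap (fun i => List.replicate (cntOf nums m i) (m + (i : Int)))

lemma pref_mono (nums : List Int) (m : Int) {i j : Nat} (h : i ≤ j) :
    prefOf nums m i ≤ prefOf nums m j := by
  induction j with
  | zero => simp [Nat.le_zero.mp h]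
  | succ j ih =>
    rcases Nat.lt_or_ge i (j + 1) with hj | hj
    · exact le_trans (ih (Nat.lt_succ_iff.mp hj)) (Nat.le_add_right _ _)
    · have : i = j + 1 := le_antisymm h hj
      simp [this]

lemma countFold_spec (m : Int) (l : List Int) (c : List Nat)
    (h : ∀ x ∈ l, m ≤ x ∧ (x - m).toNat < c.length) :
    (l.foldl (fun c num => c.set (num - m).toNat (c.getD (num - m).toNat 0 + 1)) c).length = c.length ∧
    ∀ i : Nat, (l.foldl (fun c num => c.set (num - m).toNat (c.getD (num - m).toNat 0 + 1)) c).getD i 0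
      = c.getD i 0 + l.count (m + (i : Int)) := by
  induction l generalizing c with
  | nil => simp
  | cons a l ih =>
    have ha := h a (List.mem_cons_self)
    have hrec := ih (c.set (a - m).toNat (c.getD (a - m).toNat 0 + 1)) (by
      intro x hx
      have := h x (List.mem_cons_of_mem _ hx)
      simpa using this)
    have hstep : ∀ i : Nat, (c.set (a - m).toNat (c.getD (a - m).toNat 0 + 1)).getD i 0
        = c.getD i 0 + (if a = m + (i : Int) then 1 else 0) := by
      intro i
      rw [List.getD_eq_getElem?_getD, List.getElem?_set]
      by_cases hij : (a - m).toNat = i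
      · subst hij
        have hai : a = m + (((a - m).toNat : Nat) : Int) := by omega
        rw [if_pos rfl, if_pos ha.2, if_pos hai.symm.symm]
        · simp
      · have hai : ¬ a = m + (i : Int) := by omega
        simp [hij, hai, List.getD_eq_getElem?_getD]
    constructor
    · simp only [List.foldl_cons]
      rw [hrec.1, List.length_set]
    · intro i
      simp only [List.foldl_cons]
      rw [hrec.2 i, hstep i, List.count_cons]
      simp only [beq_iff_eq]
      by_cases hai : a = m + (i : Int) <;> simp [hai] <;> omega

lemma getD_set_lt {α : Type} (c : List α) (j i : Nat) (v : α) (d : α) (hj : j < c.length) :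
    (c.set j v).getD i d = if i = j then v else c.getD i d := by
  rw [List.getD_eq_getElem?_getD, List.getElem?_set]
  by_cases h : j = i
  · subst h; simp [hj]
  · have h2 : ¬ i = j := fun h' => h h'.symm
    simp [h, h2, List.getD_eq_getElem?_getD]

lemma spFold_spec (m : Int) (R : Nat) (count : List Nat) (nums : List Int)
    (hc : ∀ i, count.getD i 0 = cntOf nums m i) (n : Nat) (hn : n ≤ R - 1) :
    ((List.range' 1 n).foldl
        (fun s i => s.set i (s.getD (i - 1) 0 + count.getD (i - 1) 0))
        (List.replicate R 0)).length = R ∧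
    ∀ i, i < R →
      (i ≤ n → ((List.range' 1 n).foldl
        (fun s i => s.set i (s.getD (i - 1) 0 + count.getD (i - 1) 0))
        (List.replicate R 0)).getD i 0 = prefOf nums m i) ∧
      (n < i → ((List.range' 1 n).foldl
        (fun s i => s.set i (s.getD (i - 1) 0 + count.getD (i - 1) 0))
        (List.replicate R 0)).getD i 0 = 0) := by
  induction n with
  | zero =>
    refine ⟨by simp, fun i hi => ⟨fun hle => ?_, fun _ => ?_⟩⟩
    · have : i = 0 := Nat.le_zero.mp hle
      subst this
      simp [prefOf, List.getD_eq_getElem?_getD, List.getElem?_replicate, hi]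
    · simp [List.getD_eq_getElem?_getD, List.getElem?_replicate, hi]
  | succ n ih =>
    have hn' : n ≤ R - 1 := by omega
    have hR : n + 1 < R := by omega
    obtain ⟨ihlen, ihval⟩ := ih hn'
    have hsplit : List.range' 1 (n + 1) = List.range' 1 n ++ [n + 1] := by
      rw [List.range'_concat]
      simp [Nat.add_comm]
    rw [hsplit]
    simp only [List.foldl_append, List.foldl_cons, List.foldl_nil, Nat.add_sub_cancel]
    have hset := fun (i : Nat) => getD_set_lt _ (n + 1) i
      (((List.range' 1 n).foldl
        (fun s i => s.set i (s.getD (i - 1) 0 + count.getD (i - 1) 0))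
        (List.replicate R 0)).getD n 0 + count.getD n 0) 0 (lt_of_lt_of_eq hR ihlen.symm)
    constructor
    · rw [List.length_set, ihlen]
    · intro i hi
      have hsi := hset i
      constructor
      · intro hle
        by_cases hie : i = n + 1
        · subst hie
          rw [hsi, if_pos rfl, (ihval n (by omega)).1 (le_refl n), hc n]
          simp [prefOf]
        · rw [hsi, if_neg hie]
          exact (ihval i hi).1 (by omega)
      · intro hgt
        rw [hsi, if_neg (by omega)]
        exact (ihval i hi).2 (by omega)

lemma filter_split (m : Int) (i : Nat) (l : List Int) :
    (l.filter (fun x => decide (m ≤ x ∧ x < m + (i : Int) + 1))).length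
      = (l.filter (fun x => decide (m ≤ x ∧ x < m + (i : Int)))).length + l.count (m + (i : Int)) := by
  induction l with
  | nil => simp
  | cons a l ih =>
    simp only [List.filter_cons, List.count_cons, beq_iff_eq]
    by_cases h1 : m ≤ a ∧ a < m + (i : Int) + 1
    · by_cases h3 : a = m + (i : Int)
      · have h2 : ¬(m ≤ a ∧ a < m + (i : Int)) := by omega
        rw [if_pos (by simpa using h1), if_neg (by simpa using h2), if_pos h3]
        simp only [List.length_cons]
        omega
      · have h2 : m ≤ a ∧ a < m + (i : Int) := by omega
        rw [if_pos (by simpa using h1), if_pos (by simpa using h2), if_neg h3]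
        simp only [List.length_cons]
        omega
    · have h2 : ¬(m ≤ a ∧ a < m + (i : Int)) := by omega
      have h3 : ¬ a = m + (i : Int) := by omega
      rw [if_neg (by simpa using h1), if_neg (by simpa using h2), if_neg h3]
      exact ih

lemma pref_count (l : List Int) (m : Int) (i : Nat) :
    prefOf l m i = (l.filter (fun x => decide (m ≤ x ∧ x < m + (i : Int)))).length := by
  induction i with
  | zero =>
    simp only [prefOf]
    symm
    rw [List.length_eq_zero_iff, List.filter_eq_nil_iff]
    intro x _
    simp
  | succ i ih =>
    simp only [prefOf, ih, cntOf]
    rw [show (fun x : Int => decide (m ≤ x ∧ x < m + ((i + 1 : Nat) : Int)))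
        = (fun x : Int => decide (m ≤ x ∧ x < m + (i : Int) + 1)) from
      funext fun x => by push_cast; ring_nf]
    rw [filter_split]

lemma pref_total (nums : List Int) (m : Int) (R : Nat)
    (h : ∀ x ∈ nums, m ≤ x ∧ (x - m).toNat < R) :
    prefOf nums m R = nums.length := by
  rw [pref_count]
  congr 1
  rw [List.filter_eq_self]
  intro x hx
  have := h x hx
  simp
  omega

lemma place_spec (m : Int) (R : Nat) (pref : Nat → Nat)
    (hmono : ∀ i j, i ≤ j → pref i ≤ pref j)
    (l : List Int) :
    ∀ (s : List Nat) (r : List Int) (p : Nat → Nat),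
    s.length = R →
    (∀ x ∈ l, m ≤ x ∧ (x - m).toNat < R) →
    (∀ i, i < R → s.getD i 0 = p i) →
    (∀ i, i < R → pref i ≤ p i ∧ p i + l.count (m + (i : Int)) ≤ pref (i + 1)) →
    pref R ≤ r.length →
    ((l.foldl (fun (st : List Nat × List Int) num =>
        let idx := (num - m).toNat
        let pos := st.1.getD idx 0
        (st.1.set idx (pos + 1), st.2.set pos num)) (s, r)).2.length = r.length ∧
     (∀ q i, i < R → p i ≤ q → q < p i + l.count (m + (i : Int)) →
        (l.foldl (fun (st : List Nat × List Int) num =>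
          let idx := (num - m).toNat
          let pos := st.1.getD idx 0
          (st.1.set idx (pos + 1), st.2.set pos num)) (s, r)).2[q]? = some (m + (i : Int))) ∧
     (∀ q : Nat, (∀ i, i < R → ¬(p i ≤ q ∧ q < p i + l.count (m + (i : Int)))) →
        (l.foldl (fun (st : List Nat × List Int) num =>
          let idx := (num - m).toNat
          let pos := st.1.getD idx 0
          (st.1.set idx (pos + 1), st.2.set pos num)) (s, r)).2[q]? = r[q]?)) := by
  induction l with
  | nil =>
    intro s r p _ _ _ _ _
    refine ⟨rfl, ?_, ?_⟩
    · intro q i _ h1 h2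
      simp only [List.count_nil] at h2
      omega
    · intro q _
      rfl
  | cons a l ih =>
    intro s r p hslen hx hs hp hr
    have ha := hx a List.mem_cons_self
    have hidxR : (a - m).toNat < R := ha.2
    have haeq : m + (((a - m).toNat : Nat) : Int) = a := by omega
    have hpos : s.getD (a - m).toNat 0 = p (a - m).toNat := hs _ hidxR
    have hcc : (a :: l).count (m + (((a - m).toNat : Nat) : Int))
        = l.count (m + (((a - m).toNat : Nat) : Int)) + 1 := by
      rw [List.count_cons, if_pos (by rw [beq_iff_eq, haeq])]
    have hcne : ∀ i : Nat, i ≠ (a - m).toNat →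
        (a :: l).count (m + (i : Int)) = l.count (m + (i : Int)) := by
      intro i hne
      rw [List.count_cons, if_neg (by rw [beq_iff_eq]; omega), Nat.add_zero]
    have hblockidx := hp (a - m).toNat hidxR
    have hposr : p (a - m).toNat < r.length := by
      have h1 : pref ((a - m).toNat + 1) ≤ pref R :=
        hmono _ _ (by omega)
      omega
    have hrec := ih (s.set (a - m).toNat (p (a - m).toNat + 1)) (r.set (p (a - m).toNat) a)
      (fun i => if i = (a - m).toNat then p i + 1 else p i)
      (by rw [List.length_set, hslen])
      (fun x hx' => hx x (List.mem_cons_of_mem _ hx'))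
      (by
        intro i hi
        beta_reduce
        rw [getD_set_lt _ _ _ _ _ (by rw [hslen]; exact hidxR)]
        by_cases hie : i = (a - m).toNat
        · rw [if_pos hie, if_pos hie, hie]
        · rw [if_neg hie, if_neg hie]
          exact hs i hi)
      (by
        intro i hi
        beta_reduce
        have hpi := hp i hi
        by_cases hie : i = (a - m).toNat
        · subst hie
          split_ifs <;> omega
        · simp only [if_neg hie]
          rw [← hcne i hie]
          exact hpi)
      (by rw [List.length_set]; exact hr)
    obtain ⟨hlen', hbul2', hbul3'⟩ := hrec
    simp only [List.foldl_cons, hpos]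
    refine ⟨?_, ?_, ?_⟩
    · rw [hlen', List.length_set]
    · intro q i hi h1 h2
      by_cases hie : i = (a - m).toNat
      · subst hie
        by_cases hq : q = p (a - m).toNat
        · subst hq
          rw [hbul3' _ ?untouched]
          case untouched =>
            intro j hj
            beta_reduce
            by_cases hje : j = (a - m).toNat
            · subst hje
              split_ifs <;> omega
            · simp only [if_neg hje]
              have hpj := hp j hj
              have hcj := hcne j hje
              rcases Nat.lt_or_ge j ((a - m).toNat) with hlt | hge
              · have hmj : pref (j + 1) ≤ pref ((a - m).toNat) :=
                  hmono _ _ (by omega)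
                omega
              · have hne' : (a - m).toNat < j := by omega
                have hmj : pref ((a - m).toNat + 1) ≤ pref j :=
                  hmono _ _ (by omega)
                omega
          rw [List.getElem?_set, if_pos rfl, if_pos hposr, haeq]
        · have hq1 : p (a - m).toNat + 1 ≤ q := by omega
          exact hbul2' q (a - m).toNat hidxR (by beta_reduce; rw [if_pos rfl]; omega)
            (by beta_reduce; rw [if_pos rfl]; omega)
      · exact hbul2' q i hi (by beta_reduce; rw [if_neg hie]; omega)
          (by beta_reduce; rw [if_neg hie, ← hcne i hie]; omega)
    · intro q hq
      have hqidx := hq (a - m).toNat hidxR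
      have hqne : q ≠ p (a - m).toNat := by omega
      rw [hbul3' q ?outside]
      case outside =>
        intro j hj
        beta_reduce
        have hqj := hq j hj
        by_cases hje : j = (a - m).toNat
        · subst hje
          split_ifs <;> omega
        · simp only [if_neg hje]
          rw [← hcne j hje]
          exact hqj
      rw [List.getElem?_set, if_neg (fun h => hqne h.symm)]


lemma target_length (nums : List Int) (m : Int) (R : Nat) :
    (targetOf nums m R).length = prefOf nums m R := by
  induction R with
  | zero => simp [targetOf, prefOf]
  | succ R ih =>
    simp only [targetOf, List.range_succ, List.flatMap_append, List.flatMap_cons,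
      List.flatMap_nil, List.length_append, List.append_nil, List.length_replicate]
    rw [← targetOf, ih]
    rfl

lemma target_get (nums : List Int) (m : Int) (R : Nat) :
    ∀ i, i < R → ∀ q, prefOf nums m i ≤ q → q < prefOf nums m (i + 1) →
      (targetOf nums m R)[q]? = some (m + (i : Int)) := by
  induction R with
  | zero => omega
  | succ R ih =>
    intro i hi q hq1 hq2
    have hsplit : targetOf nums m (R + 1)
        = targetOf nums m R ++ List.replicate (cntOf nums m R) (m + (R : Int)) := by
      simp [targetOf, List.range_succ]
    rw [hsplit]
    by_cases hiR : i < R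
    · rw [List.getElem?_append_left (by
        rw [target_length]
        exact lt_of_lt_of_le hq2 (pref_mono nums m hiR))]
      exact ih i hiR q hq1 hq2
    · have hieq : i = R := by omega
      subst hieq
      rw [List.getElem?_append_right (by rw [target_length]; exact hq1)]
      rw [target_length, List.getElem?_replicate, if_pos (by
        have : prefOf nums m (i + 1) = prefOf nums m i + cntOf nums m i := rfl
        omega)]

lemma exists_block (nums : List Int) (m : Int) (R : Nat) (q : Nat)
    (h : q < prefOf nums m R) :
    ∃ i, i < R ∧ prefOf nums m i ≤ q ∧ q < prefOf nums m (i + 1) := by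
  induction R with
  | zero => simp [prefOf] at h
  | succ R ih =>
    by_cases hq : q < prefOf nums m R
    · obtain ⟨i, h1, h2, h3⟩ := ih hq
      exact ⟨i, by omega, h2, h3⟩
    · exact ⟨R, by omega, by omega, h⟩

lemma replicate_getD_zero (R i : Nat) : (List.replicate R (0 : Nat)).getD i 0 = 0 := by
  rw [List.getD_eq_getElem?_getD, List.getElem?_replicate]
  split <;> rfl

lemma vrCount_spec (nums : List Int) (m : Int) (R : Nat)
    (hmem : ∀ x ∈ nums, m ≤ x ∧ (x - m).toNat < R) :
    (vrCount nums m R).length = R ∧ ∀ i, (vrCount nums m R).getD i 0 = cntOf nums m i := by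
  have h := countFold_spec m nums (List.replicate R 0) (by simpa using hmem)
  refine ⟨by simpa [vrCount] using h.1, fun i => ?_⟩
  have := h.2 i
  rw [replicate_getD_zero] at this
  simpa [vrCount, cntOf] using this

lemma target_reverse (nums : List Int) (m : Int) (R : Nat) :
    (targetOf nums m R).reverse
      = (List.range R).reverse.flatMap (fun i => List.replicate (cntOf nums m i) (m + (i : Int))) := by
  rw [targetOf, List.reverse_flatMap]
  apply List.flatMap_congr
  intro i _
  simp

lemma portB_eq (nums : List Int) (rev : Bool) (m M : Int)
    (hne : ¬ nums = [])
    (hm : PySem.List.min? nums (fun x => x) = some m)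
    (hM : PySem.List.max? nums (fun x => x) = some M)
    (hcond : ¬ (M - m > (nums.length : Int) * 10))
    (hmem : ∀ x ∈ nums, m ≤ x ∧ (x - m).toNat < (M - m + 1).toNat) :
    value_range_mapping_sort_alt nums rev
      = if rev then (targetOf nums m ((M - m + 1).toNat)).reverse
        else targetOf nums m ((M - m + 1).toNat) := by
  obtain ⟨hclen, hcval⟩ := vrCount_spec nums m ((M - m + 1).toNat) hmem
  have hfun : (fun (r : List Int) (i : Nat) =>
        r ++ List.replicate ((vrCount nums m ((M - m + 1).toNat)).getD i 0) (m + (i : Int)))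
      = (fun (r : List Int) (i : Nat) =>
        r ++ List.replicate (cntOf nums m i) (m + (i : Int))) := by
    funext r i
    rw [hcval i]
  rw [value_range_mapping_sort_alt]
  simp only [if_neg hne, hm, hM, Option.getD_some, if_neg hcond, hclen, hfun]
  cases rev with
  | false =>
    rw [if_neg (by simp), if_neg (by simp)]
    rw [PySem.List.foldl_append_eq_flatMap]
    rfl
  | true =>
    rw [if_pos rfl, if_pos rfl]
    rw [PySem.List.foldl_append_eq_flatMap, target_reverse]
    rfl

lemma portA_eq (nums : List Int) (rev : Bool) (m M : Int)
    (hne : ¬ nums = [])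
    (hm : PySem.List.min? nums (fun x => x) = some m)
    (hM : PySem.List.max? nums (fun x => x) = some M)
    (hcond : ¬ (M - m > (nums.length : Int) * 10))
    (hmem : ∀ x ∈ nums, m ≤ x ∧ (x - m).toNat < (M - m + 1).toNat) :
    value_range_mapping_sort nums rev
      = if rev then (targetOf nums m ((M - m + 1).toNat)).reverse
        else targetOf nums m ((M - m + 1).toNat) := by
  obtain ⟨hclen, hcval⟩ := vrCount_spec nums m ((M - m + 1).toNat) hmem
  obtain ⟨hsplen, hspval⟩ := spFold_spec m ((M - m + 1).toNat)
    (vrCount nums m ((M - m + 1).toNat)) nums hcval ((M - m + 1).toNat - 1) (le_refl _)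
  have hR1 : 1 ≤ (M - m + 1).toNat := by
    have hmem' := hmem m (PySem.List.min?_mem hm)
    omega
  have htot : prefOf nums m ((M - m + 1).toNat) = nums.length := pref_total _ _ _ hmem
  have hplace := place_spec m ((M - m + 1).toNat) (prefOf nums m)
    (fun i j hij => pref_mono nums m hij) nums.reverse
    ((List.range' 1 ((M - m + 1).toNat - 1)).foldl
      (fun s i => s.set i (s.getD (i - 1) 0 + (vrCount nums m ((M - m + 1).toNat)).getD (i - 1) 0))
      (List.replicate ((M - m + 1).toNat) 0))
    (List.replicate nums.length (0 : Int)) (prefOf nums m)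
    hsplen
    (fun x hx => hmem x (List.mem_reverse.mp hx))
    (fun i hi => (hspval i hi).1 (by omega))
    (by
      intro i hi
      rw [List.count_reverse]
      have : prefOf nums m (i + 1) = prefOf nums m i + cntOf nums m i := rfl
      have : nums.count (m + (i : Int)) = cntOf nums m i := rfl
      omega)
    (by rw [List.length_replicate, htot])
  obtain ⟨hflen, hfblock, hfout⟩ := hplace
  have hres : (nums.reverse.foldl
      (fun (st : List Nat × List Int) num =>
        let idx := (num - m).toNat
        let pos := st.1.getD idx 0
        (st.1.set idx (pos + 1), st.2.set pos num))
      ((List.range' 1 ((M - m + 1).toNat - 1)).foldl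
        (fun s i => s.set i (s.getD (i - 1) 0 + (vrCount nums m ((M - m + 1).toNat)).getD (i - 1) 0))
        (List.replicate ((M - m + 1).toNat) 0),
       List.replicate nums.length (0 : Int))).2 = targetOf nums m ((M - m + 1).toNat) := by
    apply List.ext_getElem?
    intro q
    by_cases hq : q < prefOf nums m ((M - m + 1).toNat)
    · obtain ⟨i, hi, h1, h2⟩ := exists_block nums m _ q hq
      rw [hfblock q i hi h1 (by
        rw [List.count_reverse]
        have : prefOf nums m (i + 1) = prefOf nums m i + cntOf nums m i := rfl
        have : nums.count (m + (i : Int)) = cntOf nums m i := rfl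
        omega)]
      rw [target_get nums m _ i hi q h1 h2]
    · rw [List.getElem?_eq_none (by rw [hflen, List.length_replicate]; omega),
        List.getElem?_eq_none (by rw [target_length]; omega)]
  rw [value_range_mapping_sort]
  simp only [if_neg hne, hm, hM, Option.getD_some, if_neg hcond]
  rw [hres]

-- ===== VERDICT (by name: the statement is the Claim_ definition above) =====
theorem value_range_mapping_sort_spec : Claim_equal_value_range_mapping_sort := by
  intro nums rev _
  unfold Spec_value_range_mapping_sort
  by_cases hne : nums = []
  · rw [value_range_mapping_sort, value_range_mapping_sort_alt, if_pos hne, if_pos hne]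
  · obtain ⟨m, hm⟩ : ∃ m, PySem.List.min? nums (fun x => x) = some m := by
      cases h : PySem.List.min? nums (fun x => x) with
      | none => exact absurd ((PySem.List.min?_eq_none_iff _ _).mp h) hne
      | some m => exact ⟨m, rfl⟩
    obtain ⟨M, hM⟩ : ∃ M, PySem.List.max? nums (fun x => x) = some M := by
      cases h : PySem.List.max? nums (fun x => x) with
      | none => exact absurd ((PySem.List.max?_eq_none_iff _ _).mp h) hne
      | some M => exact ⟨M, rfl⟩
    by_cases hcond : M - m > (nums.length : Int) * 10
    · rw [value_range_mapping_sort, value_range_mapping_sort_alt, if_neg hne, if_neg hne]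
      simp only [hm, hM, Option.getD_some, if_pos hcond]
    · have hmem : ∀ x ∈ nums, m ≤ x ∧ (x - m).toNat < (M - m + 1).toNat := by
        intro x hx
        have h1 := PySem.List.min?_isMin hm x hx
        have h2 := PySem.List.max?_isMax hM x hx
        simp only at h1 h2
        omega
      rw [portA_eq nums rev m M hne hm hM hcond hmem,
        portB_eq nums rev m M hne hm hM hcond hmem]
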